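-- pv_equiv track=rewrite | github.com/fabian017/Simulacion-Digital-B1 | Metodo de montecarlo/mcts-tic-tac-toe/VanilaMCTS.py | _get_valid_actions
-- ===== SOURCE A (Python) =====
-- def _get_valid_actions(leaf_state):
--     '''
--     devuelve todas las posibles acciones
--     in:
--     - leaf_state
--     out:
--     - posibles acciones ((row,col), action_idx)
--     '''
--     actions = []
--     count = 0
--     state_size = len(leaf_state)
--     #Coloca en una lista todas las posiciones donde esten vacias
--     for i in range(state_size):
--         for j in range(state_size):
--             if leaf_state[i][j] == 0:
--                 actions.append([(i, j), count])
--             count += 1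
--
--     return actions
-- ===== SOURCE B (Python) =====
-- def _get_valid_actions(leaf_state):
--     n = len(leaf_state)
--
--     def collect(i):
--         if i >= n:
--             return []
--         head = [[(i, j), i * n + j] for j in range(n) if leaf_state[i][j] == 0]
--         return head + collect(i + 1)
--
--     return collect(0)
-- ===== Notes on version B (the rewrite author's own statement) =====
-- stated objective: alternative
-- what changed: A's iterative nested loops with a mutable accumulator and running counter are replaced by a recursive decomposition over rows: each row's empty cells are produced by a comprehension with the closed-form flat index i*n+j, and the per-row lists are concatenated by recursion instead of appended to shared state.
import Mathlib
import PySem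

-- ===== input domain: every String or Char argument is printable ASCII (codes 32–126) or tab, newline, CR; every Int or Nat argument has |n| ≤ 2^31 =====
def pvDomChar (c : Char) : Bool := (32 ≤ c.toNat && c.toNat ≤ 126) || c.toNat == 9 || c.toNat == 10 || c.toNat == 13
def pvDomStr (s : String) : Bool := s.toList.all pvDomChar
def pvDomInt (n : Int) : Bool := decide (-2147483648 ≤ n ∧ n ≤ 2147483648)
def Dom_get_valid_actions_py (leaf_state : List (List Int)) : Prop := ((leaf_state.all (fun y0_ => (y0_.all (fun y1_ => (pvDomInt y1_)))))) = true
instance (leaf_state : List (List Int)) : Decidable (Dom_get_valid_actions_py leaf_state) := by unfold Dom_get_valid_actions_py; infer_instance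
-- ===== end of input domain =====

-- B replaces A's iterative nested loops with a running counter by a recursion over rows,
-- each row's empty cells built by a comprehension with the closed-form index i*n+j — an
-- alternative decomposition of the same cost.

-- ===== PORT A =====
-- literal port of A: nested loops over range(state_size) with an explicit running counter;
-- out-of-range leaf_state[i][j] (IndexError in Python) is read with a default via pyGetD —
-- exactly those inputs are excluded by Pre_ below.
def get_valid_actions_py (leaf_state : List (List Int)) : List ((Int × Int) × Int) :=
  (((PySem.List.pyRange 0 (leaf_state.length : Int) 1).foldl
      (fun (st : List ((Int × Int) × Int) × Int) i =>
        (PySem.List.pyRange 0 (leaf_state.length : Int) 1).foldl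
          (fun (st2 : List ((Int × Int) × Int) × Int) j =>
            ((if PySem.List.pyGetD (PySem.List.pyGetD leaf_state i []) j 1 == 0
                then st2.1 ++ [((i, j), st2.2)] else st2.1),
             st2.2 + 1)) st)
      ([], 0)) : List ((Int × Int) × Int) × Int).1

-- ===== PORT B =====
-- literal port of Source B's recursive helper 'collect(i)': if i >= n return [],
-- else the row-i comprehension (filter+map over range(n)) concatenated with collect(i+1)
def pvCollectB (leaf_state : List (List Int)) (n : Nat) (i : Nat) :
    List ((Int × Int) × Int) :=
  if i ≥ n then []
  else
    (((PySem.List.pyRange 0 (n : Int) 1).filter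
        (fun j => PySem.List.pyGetD (PySem.List.pyGetD leaf_state (i : Int) []) j 1 == 0)).map
        (fun j => (((i : Int), j), (i : Int) * (n : Int) + j)))
      ++ pvCollectB leaf_state n (i + 1)
  termination_by n - i

-- port of Source B: n = len(leaf_state); return collect(0)
def get_valid_actions_py_alt (leaf_state : List (List Int)) : List ((Int × Int) × Int) :=
  pvCollectB leaf_state leaf_state.length 0

-- ===== PRECONDITION & SPEC =====
-- Pre_ excludes exactly the ragged grids on which Python's leaf_state[i][j] raises IndexError
-- (some row shorter than len(leaf_state)); both A and B raise there.
def Pre_get_valid_actions_py (leaf_state : List (List Int)) : Prop :=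
  ∀ row ∈ leaf_state, leaf_state.length ≤ row.length
instance (leaf_state : List (List Int)) : Decidable (Pre_get_valid_actions_py leaf_state) := by
  unfold Pre_get_valid_actions_py; infer_instance
def pvWitness_get_valid_actions_py : List (List Int) := [[0, 1], [1, 0]]

def Spec_get_valid_actions_py (leaf_state : List (List Int)) (out : List ((Int × Int) × Int)) : Prop := out = get_valid_actions_py_alt leaf_state
instance (leaf_state : List (List Int)) (out : List ((Int × Int) × Int)) : Decidable (Spec_get_valid_actions_py leaf_state out) := by unfold Spec_get_valid_actions_py; infer_instance

-- ===== CLAIM =====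
def Claim_equal_get_valid_actions_py : Prop := ∀ (leaf_state : List (List Int)), Dom_get_valid_actions_py leaf_state → Pre_get_valid_actions_py leaf_state → Spec_get_valid_actions_py leaf_state (get_valid_actions_py leaf_state)

-- ===== LEMMAS AND PROOFS =====

-- the cell test both ports perform (proof-side abbreviation)
def pvP (ls : List (List Int)) (i j : Int) : Bool :=
  PySem.List.pyGetD (PySem.List.pyGetD ls i []) j 1 == 0

-- per-row segment of the common normal form
def pvRow (ls : List (List Int)) (n i : Nat) : List ((Int × Int) × Int) :=
  ((List.range n).filter (fun (j : Nat) => pvP ls (i : Int) (j : Int))).map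
    (fun (j : Nat) => (((i : Int), (j : Int)), ((i * n + j : Nat) : Int)))

-- common normal form of both results: row-major list of empty cells with flat indices
def pvCells (ls : List (List Int)) (n : Nat) : List ((Int × Int) × Int) :=
  (List.range n).flatMap (pvRow ls n)

-- A's inner loop: appends the empty cells of row i, counter advances by n
lemma innerA (ls : List (List Int)) (i : Int) :
    ∀ (m : Nat) (acc : List ((Int × Int) × Int)) (c : Int),
      (List.range m).foldl
        (fun (st2 : List ((Int × Int) × Int) × Int) (j : Nat) =>
          ((if pvP ls i (j : Int) then st2.1 ++ [((i, (j : Int)), st2.2)] else st2.1),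
           st2.2 + 1)) (acc, c)
      = (acc ++ ((List.range m).filter (fun (j : Nat) => pvP ls i (j : Int))).map
            (fun (j : Nat) => ((i, (j : Int)), c + (j : Int))), c + (m : Int)) := by
  intro m
  induction m with
  | zero => intro acc c; simp
  | succ m ih =>
    intro acc c
    rw [List.range_succ, List.foldl_append, ih, List.filter_append, List.map_append]
    simp only [List.foldl_cons, List.foldl_nil, List.filter_cons, List.filter_nil]
    split_ifs with h
    · simp only [List.map_cons, List.map_nil, Prod.mk.injEq]
      refine ⟨?_, ?_⟩
      · rw [List.append_assoc]
      · push_cast; ring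
    · simp only [List.map_nil, List.append_nil, Prod.mk.injEq]
      exact ⟨trivial, by push_cast; ring⟩

-- A's outer loop: concatenates the rows, row i starts at counter c + i*n
lemma outerA (ls : List (List Int)) (n : Nat) :
    ∀ (m : Nat) (acc : List ((Int × Int) × Int)) (c : Int),
      (List.range m).foldl
        (fun (st : List ((Int × Int) × Int) × Int) (i : Nat) =>
          (List.range n).foldl
            (fun (st2 : List ((Int × Int) × Int) × Int) (j : Nat) =>
              ((if pvP ls (i : Int) (j : Int) then st2.1 ++ [(((i : Int), (j : Int)), st2.2)] else st2.1),
               st2.2 + 1)) st) (acc, c)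
      = (acc ++ (List.range m).flatMap (fun (i : Nat) =>
            ((List.range n).filter (fun (j : Nat) => pvP ls (i : Int) (j : Int))).map
              (fun (j : Nat) => (((i : Int), (j : Int)), c + ((i * n + j : Nat) : Int)))),
         c + ((m * n : Nat) : Int)) := by
  intro m
  induction m with
  | zero => intro acc c; simp
  | succ m ih =>
    intro acc c
    rw [List.range_succ, List.foldl_append, ih]
    simp only [List.foldl_cons, List.foldl_nil]
    rw [innerA ls ((m : Nat) : Int) n]
    rw [List.flatMap_append]
    simp only [Prod.mk.injEq]
    refine ⟨?_, ?_⟩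
    · rw [List.append_assoc, List.append_right_inj,
          List.flatMap_cons, List.flatMap_nil, List.append_nil, List.append_right_inj]
      apply List.map_congr_left
      intro j hj
      push_cast; ring_nf
    · push_cast; ring

lemma A_eq_cells (ls : List (List Int)) :
    get_valid_actions_py ls = pvCells ls ls.length := by
  unfold get_valid_actions_py pvCells pvRow
  rw [PySem.List.pyRange_zero_natCast, List.foldl_map]
  have h := outerA ls ls.length ls.length [] 0
  simp only [List.foldl_map, pvP] at h ⊢
  refine Eq.trans (congrArg Prod.fst h) ?_
  simp

-- B's recursion produces exactly the rows k, k+1, …, n-1 of the normal form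
lemma B_collect_eq (ls : List (List Int)) (n : Nat) :
    ∀ (m k : Nat), m = n - k →
      pvCollectB ls n k = (List.range' k m).flatMap (pvRow ls n) := by
  intro m
  induction m with
  | zero =>
    intro k hk
    have hkn : k ≥ n := by omega
    rw [pvCollectB]
    simp [hkn]
  | succ m ih =>
    intro k hk
    have hkn : ¬ k ≥ n := by omega
    rw [pvCollectB]
    simp only [hkn, if_false]
    rw [ih (k + 1) (by omega), List.range'_succ, List.flatMap_cons]
    congr 1
    unfold pvRow
    rw [PySem.List.pyRange_zero_natCast, List.filter_map, List.map_map]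
    have hfil :
        (List.range n).filter
            ((fun j => PySem.List.pyGetD (PySem.List.pyGetD ls (k : Int) []) j 1 == 0)
              ∘ (fun (x : Nat) => (x : Int)))
          = (List.range n).filter (fun (j : Nat) => pvP ls (k : Int) (j : Int)) := by
      apply List.filter_congr
      intro j _
      simp [pvP, Function.comp]
    rw [hfil]
    apply List.map_congr_left
    intro j _
    simp only [Function.comp_apply, Prod.mk.injEq]
    constructor
    · trivial
    · push_cast; ring

lemma B_eq_cells (ls : List (List Int)) :
    get_valid_actions_py_alt ls = pvCells ls ls.length := by
  unfold get_valid_actions_py_alt pvCells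
  rw [B_collect_eq ls ls.length ls.length 0 (by omega)]
  rw [List.range_eq_range']

-- ===== VERDICT =====
theorem get_valid_actions_py_spec : Claim_equal_get_valid_actions_py := by
  intro ls _ _
  unfold Spec_get_valid_actions_py
  rw [A_eq_cells, B_eq_cells]
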